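-- pv_equiv track=rewrite | github.com/ASSERT-KTH/Mokav | experiments/pynguin/c4b/return-lst/generated_tests/src_1960/3/src_1960.py | func
-- ===== SOURCE A (Python) =====
-- def func(*args):
-- 	ret_values = []
--
-- 	n = int(args[0])
-- 	get = []
-- 	x = 1
-- 	out = ''
-- 	for i in range(1, n):
-- 	    x = (x + i)
-- 	    if (x > n):
-- 	        x = (x % n)
-- 	    if (i == (n - 1)):
-- 	        out += str(x)
-- 	    else:
-- 	        out += (str(x) + ' ')
-- 	ret_values.append(out)
--
-- 	return ret_values
-- ===== SOURCE B (Python) =====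
-- def func(*args):
--     n = int(args[0])
--     return [' '.join(str((i * (i + 1) // 2) % n + 1) for i in range(1, n))]
-- ===== Notes on version B (the rewrite author's own statement) =====
-- stated objective: simpler
-- what changed: Replaces the running accumulator x with conditional modular reduction and the manual last-element spacing by a direct per-element closed form (i*(i+1)//2) % n + 1 joined with ' '.join.
import Mathlib
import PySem

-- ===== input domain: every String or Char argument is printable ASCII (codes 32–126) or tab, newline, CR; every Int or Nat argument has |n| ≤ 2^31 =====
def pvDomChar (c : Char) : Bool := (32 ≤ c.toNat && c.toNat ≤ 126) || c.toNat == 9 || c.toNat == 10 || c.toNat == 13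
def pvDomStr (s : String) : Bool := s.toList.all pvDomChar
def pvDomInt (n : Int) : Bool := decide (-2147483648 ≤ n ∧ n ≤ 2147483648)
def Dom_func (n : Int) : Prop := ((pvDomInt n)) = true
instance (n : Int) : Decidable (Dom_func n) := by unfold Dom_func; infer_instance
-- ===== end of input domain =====

-- B replaces A's running accumulator and conditional reduction by the per-element
-- closed form (i*(i+1)//2) % n + 1 joined with ' '.join (objective: simpler).

-- ===== PORT A =====
def func (n : Int) : List String :=
  let s := (PySem.List.pyRange 1 n 1).foldl
    (fun (st : Int × String) (i : Int) =>
      let x0 := st.1 + i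
      let x := if x0 > n then PySem.Int.mod x0 n else x0
      if i == n - 1 then (x, st.2 ++ PySem.Int.toStr x)
      else (x, st.2 ++ (PySem.Int.toStr x ++ " ")))
    (1, "")
  [s.2]

-- ===== PORT B =====
def func_alt (n : Int) : List String :=
  [PySem.Str.join " " ((PySem.List.pyRange 1 n 1).map
    (fun i => PySem.Int.toStr (PySem.Int.mod (PySem.Int.floordiv (i * (i + 1)) 2) n + 1)))]

-- ===== PRECONDITION & SPEC =====
def Spec_func (n : Int) (out : List String) : Prop := out = func_alt n
instance (n : Int) (out : List String) : Decidable (Spec_func n out) := by unfold Spec_func; infer_instance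

-- ===== CLAIM (what is proved, stated in full; the proofs are below) =====
def Claim_equal_func : Prop := ∀ (n : Int), Dom_func n → Spec_func n (func n)

-- ===== LEMMAS AND PROOFS =====

def pvStep (n : Int) : Int × String → Int → Int × String :=
  fun st i =>
    let x0 := st.1 + i
    let x := if x0 > n then PySem.Int.mod x0 n else x0
    if i == n - 1 then (x, st.2 ++ PySem.Int.toStr x)
    else (x, st.2 ++ (PySem.Int.toStr x ++ " "))

def pvG (n i : Int) : List Char :=
  PySem.Int.toChars (PySem.Int.mod (PySem.Int.floordiv (i * (i + 1)) 2) n + 1)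

lemma pv_join_trail (l : List (List Char)) (a : List Char) :
    PySem.Chars.join " ".toList (l ++ [a])
      = (l.map (· ++ " ".toList)).flatten ++ a := by
  induction l with
  | nil => simp [PySem.Chars.join_singleton]
  | cons h t ih =>
    obtain ⟨c, cs, hc⟩ : ∃ c cs, t ++ [a] = c :: cs := by
      cases t <;> exact ⟨_, _, rfl⟩
    rw [List.cons_append, hc, PySem.Chars.join_cons_cons, ← hc, ih]
    simp

lemma pv_stepx (n x i : Int) (hn : 2 ≤ n) (hi : 1 ≤ i) (hi2 : i ≤ n - 1)
    (hx : x = PySem.Int.mod (PySem.Int.floordiv ((i - 1) * i) 2) n + 1) :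
    (if x + i > n then PySem.Int.mod (x + i) n else x + i)
      = PySem.Int.mod (PySem.Int.floordiv (i * (i + 1)) 2) n + 1 := by
  have h2 : (0:Int) < 2 := by norm_num
  have hn0 : (0:Int) < n := by omega
  rw [PySem.Int.floordiv_eq_ediv_of_pos h2, PySem.Int.mod_eq_emod_of_pos hn0] at hx
  rw [PySem.Int.floordiv_eq_ediv_of_pos h2, PySem.Int.mod_eq_emod_of_pos hn0,
      PySem.Int.mod_eq_emod_of_pos hn0]
  have htri : i * (i + 1) / 2 = (i - 1) * i / 2 + i := by
    have : i * (i + 1) = (i - 1) * i + i * 2 := by ring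
    rw [this, Int.add_mul_ediv_right _ _ (by norm_num)]
  set a := (i - 1) * i / 2 % n with ha
  have ha0 : 0 ≤ a := Int.emod_nonneg _ (by omega)
  have ha1 : a < n := Int.emod_lt_of_pos _ hn0
  have hrhs : i * (i + 1) / 2 % n = (a + i) % n := by
    rw [htri, ← Int.emod_add_emod]
  rw [hrhs, hx]
  by_cases hc : a + 1 + i > n
  · rw [if_pos hc]
    have e1 : (a + 1 + i) % n = a + 1 + i - n := by
      rw [← Int.sub_emod_right (a + 1 + i) n, Int.emod_eq_of_lt (by omega) (by omega)]
    have e2 : (a + i) % n = a + i - n := by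
      rw [← Int.sub_emod_right (a + i) n, Int.emod_eq_of_lt (by omega) (by omega)]
    omega
  · rw [if_neg hc]
    have e2 : (a + i) % n = a + i := Int.emod_eq_of_lt (by omega) (by omega)
    omega

lemma pv_loopA (n : Int) (hn : 2 ≤ n) : ∀ k : Nat, (k : Int) ≤ n - 2 →
    ((PySem.List.pyRange 1 (1 + (k : Int)) 1).foldl (pvStep n) (1, "")).1
        = PySem.Int.mod (PySem.Int.floordiv ((k : Int) * ((k : Int) + 1)) 2) n + 1
    ∧ ((PySem.List.pyRange 1 (1 + (k : Int)) 1).foldl (pvStep n) (1, "")).2.toList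
        = ((PySem.List.pyRange 1 (1 + (k : Int)) 1).map (fun i => pvG n i ++ " ".toList)).flatten := by
  intro k
  induction k with
  | zero =>
    intro _
    rw [show (1 + ((0:Nat):Int)) = 1 by norm_num, PySem.List.pyRange_one_eq_nil le_rfl]
    constructor
    · simp [PySem.Int.mod_eq_emod_of_pos (by omega : (0 : Int) < n)]
    · simp
  | succ k ih =>
    intro hk
    have hk' : (k : Int) ≤ n - 2 := by push_cast at hk ⊢; omega
    obtain ⟨ih1, ih2⟩ := ih hk'
    have hsplit : PySem.List.pyRange 1 (1 + ((k + 1 : Nat) : Int)) 1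
        = PySem.List.pyRange 1 (1 + (k : Int)) 1 ++ [1 + (k : Int)] := by
      rw [show (1 + ((k + 1 : Nat) : Int)) = (1 + (k : Int)) + 1 by push_cast; ring]
      exact PySem.List.pyRange_one_succ_right (by omega)
    rw [hsplit, List.foldl_append]
    set st := (PySem.List.pyRange 1 (1 + (k : Int)) 1).foldl (pvStep n) (1, "") with hst
    have hne : ((1 + (k : Int)) == n - 1) = false := by
      rw [beq_eq_false_iff_ne]; push_cast at hk; omega
    have hxval : (if st.1 + (1 + (k : Int)) > n then PySem.Int.mod (st.1 + (1 + (k : Int))) n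
          else st.1 + (1 + (k : Int)))
        = PySem.Int.mod (PySem.Int.floordiv ((1 + (k : Int)) * ((1 + (k : Int)) + 1)) 2) n + 1 := by
      apply pv_stepx n st.1 (1 + (k : Int)) hn (by omega) (by push_cast at hk; omega)
      rw [ih1]; ring_nf
    constructor
    · simp only [List.foldl_cons, List.foldl_nil, pvStep, hne, if_false, Bool.false_eq_true]
      rw [hxval]; push_cast; ring_nf
    · simp only [List.foldl_cons, List.foldl_nil, pvStep, hne, if_false, Bool.false_eq_true]
      simp only [List.map_append, List.flatten_append, ← ih2]
      rw [hxval]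
      simp [pvG]
theorem pv_main (n : Int) : func n = func_alt n := by
  have hstep : (fun (st : Int × String) (i : Int) =>
      let x0 := st.1 + i
      let x := if x0 > n then PySem.Int.mod x0 n else x0
      if i == n - 1 then (x, st.2 ++ PySem.Int.toStr x)
      else (x, st.2 ++ (PySem.Int.toStr x ++ " "))) = pvStep n := rfl
  simp only [func, func_alt, hstep]
  congr 1
  apply String.toList_inj.mp
  by_cases hn : n ≤ 1
  · rw [PySem.List.pyRange_one_eq_nil hn]
    simp [PySem.Chars.join_nil]
  · 
    have hn2 : 2 ≤ n := by omega
    have hcast : ((((n - 2).toNat : Nat)) : Int) = n - 2 := by omega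
    have hsplit : PySem.List.pyRange 1 n 1
        = PySem.List.pyRange 1 (n - 1) 1 ++ [n - 1] := by
      have h := PySem.List.pyRange_one_succ_right (a := 1) (b := n - 1) (by omega)
      rwa [show n - 1 + 1 = n by ring] at h
    have hpre : (1 : Int) + (((n - 2).toNat : Nat) : Int) = n - 1 := by omega
    obtain ⟨h1, h2⟩ := pv_loopA n hn2 (n - 2).toNat (by omega)
    rw [hpre] at h1 h2
    rw [hcast] at h1
    rw [hsplit, List.foldl_append]
    set st := (PySem.List.pyRange 1 (n - 1) 1).foldl (pvStep n) (1, "") with hst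
    have heq : ((n - 1 : Int) == n - 1) = true := by simp
    have hxval : (if st.1 + (n - 1) > n then PySem.Int.mod (st.1 + (n - 1)) n
          else st.1 + (n - 1))
        = PySem.Int.mod (PySem.Int.floordiv ((n - 1) * ((n - 1) + 1)) 2) n + 1 := by
      apply pv_stepx n st.1 (n - 1) hn2 (by omega) (by omega)
      rw [h1]; ring_nf
    simp only [List.foldl_cons, List.foldl_nil, pvStep, heq, if_true]
    rw [hxval]
    -- A side toList
    simp only [String.toList_append, h2, PySem.Int.toList_toStr]
    -- B side
    rw [PySem.Str.toList_join]
    simp only [List.map_append, List.map_map, List.map_cons, List.map_nil]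
    rw [pv_join_trail]
    simp [pvG, Function.comp_def, PySem.Int.toList_toStr]

-- ===== VERDICT (by name: the statement is the Claim_ definition above) =====
theorem func_spec : Claim_equal_func := by
  intro n _
  unfold Spec_func
  exact pv_main n
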